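-- pv_equiv track=rewrite | github.com/lakazatong/dice_problem | solve.py | get_reachable_sums
-- ===== SOURCE A (Python) =====
-- def get_reachable_sums(values, n, k):
-- 	reachable_sums = set()
-- 	def find_sums(count):
-- 		dp = {0}
-- 		for _ in range(count):
-- 			dp = {s + v for s in dp for v in values}
-- 		return dp
-- 	reachable_sums.update(find_sums(k))
-- 	reachable_sums.update(find_sums(n - k))
-- 	return reachable_sums
-- ===== SOURCE B (Python) =====
-- def get_reachable_sums(values, n, k):
-- 	# incremental frontier closure: with w = v - values[0] (so 0 is in w), the
-- 	# shifted m-dice sum set only ever grows, and each round only the newly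
-- 	# reached sums (the frontier) can produce anything new — per-round work is
-- 	# proportional to the new sums, not to the whole set
-- 	out = set()
-- 	for c in (k, n - k):
-- 		m = max(c, 0)
-- 		if m == 0:
-- 			out.add(0)
-- 		elif values:
-- 			v0 = values[0]
-- 			w = [v - v0 for v in values]
-- 			reach = {0}
-- 			frontier = reach
-- 			for _ in range(m):
-- 				frontier = {t + d for t in frontier for d in w} - reach
-- 				reach |= frontier
-- 			out |= {t + m * v0 for t in reach}
-- 	return out
-- ===== Notes on version B (the rewrite author's own statement) =====
-- stated objective: faster
-- what changed: A re-expands the entire sum set by one die each round; B normalises the dice by subtracting values[0] (so 0 is always a step, making the shifted reachable set monotone) and expands only the frontier of newly reached sums each round, so per-round work is proportional to the new sums instead of the whole set.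
import Mathlib
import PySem

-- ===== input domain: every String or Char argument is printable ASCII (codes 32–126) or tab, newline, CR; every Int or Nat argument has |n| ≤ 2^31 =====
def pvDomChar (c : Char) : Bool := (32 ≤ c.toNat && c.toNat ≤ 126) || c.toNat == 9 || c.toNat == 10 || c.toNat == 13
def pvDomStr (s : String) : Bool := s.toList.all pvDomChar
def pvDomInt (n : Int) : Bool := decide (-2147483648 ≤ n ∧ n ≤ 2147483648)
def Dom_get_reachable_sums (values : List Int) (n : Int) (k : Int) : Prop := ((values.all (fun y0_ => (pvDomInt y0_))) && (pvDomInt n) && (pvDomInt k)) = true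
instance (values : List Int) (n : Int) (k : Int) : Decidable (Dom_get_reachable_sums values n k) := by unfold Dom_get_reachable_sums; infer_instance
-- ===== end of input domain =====

-- A re-expands the WHOLE sum set by one die per round; B shifts the values by
-- values[0] (so 0 is a step) and each round expands only the FRONTIER of newly
-- reached sums, so per-round work scales with the new sums, not with the set.
-- Return value identical (a Python set, modelled as a duplicate-free list).

-- ===== PORT A =====
-- find_sums(count): dp = {0}; for _ in range(count): dp = {s + v for s in dp for v in values}
def pvFindSums (values : List Int) (count : Int) : List Int :=
  (PySem.List.pyRange 0 count 1).foldl
    (fun dp _ => PySem.Set.ofList (dp.flatMap (fun s => values.map (fun v => s + v)))) [0]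

def get_reachable_sums (values : List Int) (n : Int) (k : Int) : List Int :=
  -- reachable_sums = set(); reachable_sums.update(find_sums(k)); reachable_sums.update(find_sums(n-k))
  PySem.Set.update (PySem.Set.update PySem.Set.empty (pvFindSums values k))
    (pvFindSums values (n - k))

-- ===== PORT B =====
-- frontier = {t + d for t in frontier for d in w} - reach; reach |= frontier
def pvLoopBody (w : List Int) (st : List Int × List Int) (_ : Int) : List Int × List Int :=
  let frontier := PySem.Set.diff
    (PySem.Set.ofList (st.2.flatMap (fun t => w.map (fun d => t + d)))) st.1
  (PySem.Set.update st.1 frontier, frontier)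

-- the body of "for c in (k, n - k):" — one power, merged into out
def pvPowerStep (values : List Int) (out : List Int) (c : Int) : List Int :=
  let m := max c 0
  if m = 0 then PySem.Set.add out 0         -- out.add(0)
  else
    match values with
    | [] => out                              -- no values: no m-dice sums
    | v0 :: _ =>
      -- (match keeps python's "elif values:" / v0 = values[0] structure)
      -- w = [v - v0 for v in values]; reach = {0}; frontier = reach
      let w := values.map (fun v => v - v0)
      -- for _ in range(m): <pvLoopBody>
      let rf := (PySem.List.pyRange 0 m 1).foldl (pvLoopBody w) ([0], [0])
      -- out |= {t + m * v0 for t in reach}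
      PySem.Set.update out (rf.1.map (fun t => t + m * v0))

def get_reachable_sums_alt (values : List Int) (n : Int) (k : Int) : List Int :=
  [k, n - k].foldl (fun out c => pvPowerStep values out c) PySem.Set.empty

-- ===== PRECONDITION & SPEC =====
def Spec_get_reachable_sums (values : List Int) (n : Int) (k : Int) (out : List Int) : Prop := out = get_reachable_sums_alt values n k
instance (values : List Int) (n : Int) (k : Int) (out : List Int) : Decidable (Spec_get_reachable_sums values n k out) := by unfold Spec_get_reachable_sums; infer_instance

-- ===== CLAIM (what is proved, stated in full; the proofs are below) =====
def Claim_equal_get_reachable_sums : Prop := ∀ (values : List Int) (n : Int) (k : Int), Dom_get_reachable_sums values n k → Spec_get_reachable_sums values n k (get_reachable_sums values n k)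

-- ===== LEMMAS AND PROOFS =====

-- A's one-die expansion step (proof-side name for the comprehension in both ports)
def pvMink (xs ys : List Int) : List Int :=
  PySem.Set.ofList (xs.flatMap (fun x => ys.map (fun y => x + y)))

-- the j-fold expansion from {0}
def pvT (w : List Int) (j : Nat) : List Int :=
  (fun s => pvMink s w)^[j] [0]

-- one comprehension row block
def pvRows (w L : List Int) : List Int :=
  L.flatMap (fun t => w.map (fun d => t + d))

-- B's loop body as a function of the (reach, frontier) state
def pvGstep (w : List Int) (st : List Int × List Int) : List Int × List Int :=
  let frontier := PySem.Set.diff (PySem.Set.ofList (pvRows w st.2)) st.1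
  (PySem.Set.update st.1 frontier, frontier)

-- a foldl that ignores the counter is a function iterate
theorem pv_foldl_const_ignore_arg {α : Type} (g : α → α) (l : List Int) (init : α) :
    l.foldl (fun st _ => g st) init = g^[l.length] init := by
  induction l generalizing init with
  | nil => rfl
  | cons h t ih => simp [List.foldl_cons, ih, Function.iterate_succ_apply]

-- B's loop over range(m) is the iterate of its body
theorem pv_fold_loopBody (w : List Int) (l : List Int) :
    l.foldl (pvLoopBody w) ([0], [0]) = (pvGstep w)^[l.length] ([0], [0]) := by
  rw [show pvLoopBody w = (fun st _ => pvGstep w st) from rfl, pv_foldl_const_ignore_arg]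

-- A's find_sums is the iterate pvT
theorem pv_findSums_eq_iter (values : List Int) (c : Int) :
    pvFindSums values c = pvT values c.toNat := by
  unfold pvFindSums pvT
  rw [show (fun (dp : List Int) (_ : Int) =>
        PySem.Set.ofList (dp.flatMap (fun s => values.map (fun v => s + v))))
      = (fun dp _ => pvMink dp values) from rfl]
  rw [pv_foldl_const_ignore_arg, PySem.List.length_pyRange_one]
  have : (c - 0).toNat = c.toNat := by omega
  rw [this]

-- set(map f xs) = map f (set(xs)) for injective f
theorem pv_ofList_map_inj (f : Int → Int) (hf : Function.Injective f) (L : List Int) :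
    PySem.Set.ofList (L.map f) = (PySem.Set.ofList L).map f := by
  induction L using List.reverseRecOn with
  | nil => rfl
  | append_singleton xs x ih =>
    rw [List.map_append, List.map_singleton, PySem.Set.ofList_append_singleton,
      PySem.Set.ofList_append_singleton, PySem.Set.add_eq_ite, PySem.Set.add_eq_ite, ih]
    have hmem : f x ∈ (PySem.Set.ofList xs).map f ↔ x ∈ PySem.Set.ofList xs := by
      constructor
      · intro h
        obtain ⟨y, hy, hxy⟩ := List.mem_map.mp h
        rwa [← hf hxy]
      · intro h; exact List.mem_map.mpr ⟨x, h, rfl⟩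
    by_cases hx : x ∈ PySem.Set.ofList xs
    · rw [if_pos (hmem.mpr hx), if_pos hx]
    · rw [if_neg (fun h => hx (hmem.mp h)), if_neg hx, List.map_append, List.map_singleton]

-- s.update(L) appends exactly set(L) - s, in order
theorem pv_update_eq_append_diff (s L : List Int) :
    PySem.Set.update s L = s ++ PySem.Set.diff (PySem.Set.ofList L) s := by
  rw [PySem.Set.update_eq_append_filter]
  rfl

-- the new-elements filter is idempotent
theorem pv_diff_diff (s X : List Int) :
    PySem.Set.diff (PySem.Set.diff X s) s = PySem.Set.diff X s := by
  show (X.filter _).filter _ = X.filter _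
  rw [List.filter_filter]
  simp

-- set(L) - s is duplicate-free
theorem pv_nodup_diff_ofList (s L : List Int) :
    (PySem.Set.diff (PySem.Set.ofList L) s).Nodup :=
  List.Nodup.filter _ (PySem.Set.nodup_ofList L)

-- s.update(L) only sees L through its new elements
theorem pv_update_diff (s L : List Int) :
    PySem.Set.update s L
      = PySem.Set.update s (PySem.Set.diff (PySem.Set.ofList L) s) := by
  rw [pv_update_eq_append_diff, pv_update_eq_append_diff,
    PySem.Set.ofList_eq_self_of_nodup _ (pv_nodup_diff_ofList s L), pv_diff_diff]

-- updating with a diff-by-s block is a plain append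
theorem pv_update_diff_append (s X : List Int) :
    PySem.Set.update s (PySem.Set.diff (PySem.Set.ofList X) s)
      = s ++ PySem.Set.diff (PySem.Set.ofList X) s := by
  rw [pv_update_eq_append_diff,
    PySem.Set.ofList_eq_self_of_nodup _ (pv_nodup_diff_ofList s X), pv_diff_diff]

-- base of the frontier invariant: one round from {0} (head of w is 0)
theorem pv_base (u : List Int) :
    pvT (0 :: u) 1 = PySem.Set.update [0] (pvRows (0 :: u) [0]) := by
  have hrows : pvRows (0 :: u) [0] = 0 :: u.map (fun d => 0 + d) := by
    simp [pvRows]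
  have hT : pvT (0 :: u) 1 = PySem.Set.ofList (pvRows (0 :: u) [0]) := rfl
  rw [hT, pv_update_eq_append_diff, hrows, PySem.Set.ofList_cons]
  have hdiff : PySem.Set.diff
      (0 :: PySem.Set.discard (PySem.Set.ofList (u.map (fun d => 0 + d))) 0) [0]
      = PySem.Set.discard (PySem.Set.ofList (u.map (fun d => 0 + d))) 0 := by
    show List.filter _ _ = _
    rw [List.filter_cons]
    simp only [PySem.Set.contains_eq_listContains]
    have h0 : (!([0] : List Int).contains 0) = false := by decide
    rw [h0]
    simp only [Bool.false_eq_true, if_false]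
    apply List.filter_eq_self.mpr
    intro a ha
    have : a ≠ 0 := ((PySem.Set.mem_discard _ _ _).mp ha).2
    simp [this]
  rw [hdiff]
  rfl

-- the frontier invariant: B's state after j rounds holds the full reach set,
-- and the stored frontier suffices to produce the next round
theorem pv_inv (u : List Int) (j : Nat) :
    ((pvGstep (0 :: u))^[j] ([0], [0])).1 = pvT (0 :: u) j
  ∧ pvT (0 :: u) (j + 1)
      = PySem.Set.update (pvT (0 :: u) j)
          (pvRows (0 :: u) ((pvGstep (0 :: u))^[j] ([0], [0])).2) := by
  induction j with
  | zero => exact ⟨rfl, pv_base u⟩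
  | succ j ih =>
    obtain ⟨ih1, ih2⟩ := ih
    rw [Function.iterate_succ_apply']
    set S := (pvGstep (0 :: u))^[j] ([0], [0]) with hS
    have hstep1 : (pvGstep (0 :: u) S).1
        = PySem.Set.update (pvT (0 :: u) j)
            (PySem.Set.diff (PySem.Set.ofList (pvRows (0 :: u) S.2)) (pvT (0 :: u) j)) := by
      rw [pvGstep, ih1]
    have h1 : (pvGstep (0 :: u) S).1 = pvT (0 :: u) (j + 1) := by
      rw [hstep1, ← pv_update_diff, ← ih2]
    refine ⟨h1, ?_⟩
    have hF : (pvGstep (0 :: u) S).2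
        = PySem.Set.diff (PySem.Set.ofList (pvRows (0 :: u) S.2)) (pvT (0 :: u) j) := by
      rw [pvGstep, ih1]
    have hsplit : pvT (0 :: u) (j + 1)
        = pvT (0 :: u) j ++ (pvGstep (0 :: u) S).2 := by
      rw [← h1, hstep1, pv_update_diff_append, hF]
    have hsucc : pvT (0 :: u) (j + 2)
        = PySem.Set.ofList (pvRows (0 :: u) (pvT (0 :: u) (j + 1))) := by
      show (fun s => pvMink s (0 :: u))^[j + 2] [0] = _
      rw [Function.iterate_succ_apply']
      rfl
    rw [hsucc, hsplit, show pvRows (0 :: u) (pvT (0 :: u) j ++ (pvGstep (0 :: u) S).2)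
        = pvRows (0 :: u) (pvT (0 :: u) j) ++ pvRows (0 :: u) (pvGstep (0 :: u) S).2 from
        List.flatMap_append, PySem.Set.ofList_append]
    have hback : PySem.Set.ofList (pvRows (0 :: u) (pvT (0 :: u) j)) = pvT (0 :: u) (j + 1) := by
      show PySem.Set.ofList (pvRows (0 :: u) (pvT (0 :: u) j))
          = (fun s => pvMink s (0 :: u))^[j + 1] [0]
      rw [Function.iterate_succ_apply']
      rfl
    rw [hback, hsplit]

-- one step of A's comprehension, shifted by a per-die offset v0
theorem pv_mink_shift (X values : List Int) (a v0 : Int) :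
    pvMink (X.map (fun t => t + a)) values
      = (pvMink X (values.map (fun v => v - v0))).map (fun t => t + (a + v0)) := by
  unfold pvMink
  rw [← pv_ofList_map_inj (fun t => t + (a + v0)) (fun x y h => by simpa using h)]
  congr 1
  rw [List.flatMap_map, List.map_flatMap]
  apply List.flatMap_congr
  intro t _
  rw [List.map_map, List.map_map]
  apply List.map_congr_left
  intro v _
  simp only [Function.comp]
  ring

-- the whole iterate, shifted: sums of m dice = shifted sums of m shifted dice
theorem pv_iter_shift (values : List Int) (v0 : Int) (j : Nat) :
    pvT values j
      = (pvT (values.map (fun v => v - v0)) j).map (fun t => t + (j : Int) * v0) := by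
  induction j with
  | zero => simp [pvT]
  | succ j ih =>
    unfold pvT at ih ⊢
    rw [Function.iterate_succ_apply', Function.iterate_succ_apply', ih,
      pv_mink_shift _ _ _ v0]
    congr 1
    funext t
    push_cast
    ring

-- flatMap of nothing is nothing
theorem pv_flatMap_nil (X : List Int) : X.flatMap (fun _ : Int => ([] : List Int)) = [] := by
  induction X <;> simp_all

-- with no values, one or more expansions empty the set
theorem pv_iter_nil (j : Nat) (hj : 0 < j) : pvT ([] : List Int) j = [] := by
  cases j with
  | zero => omega
  | succ j =>
    unfold pvT
    rw [Function.iterate_succ_apply']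
    show pvMink ((fun s => pvMink s ([] : List Int))^[j] [0]) [] = []
    unfold pvMink
    simp [pv_flatMap_nil]

-- the central step lemma: one pass of B's loop = merging A's find_sums
theorem pv_step (values out : List Int) (c : Int) :
    pvPowerStep values out c = PySem.Set.update out (pvFindSums values c) := by
  unfold pvPowerStep
  by_cases hm : max c 0 = 0
  · rw [if_pos hm, pv_findSums_eq_iter, show c.toNat = 0 from by omega]
    rfl
  · rw [if_neg hm]
    cases values with
    | nil =>
      rw [pv_findSums_eq_iter, pv_iter_nil c.toNat (by omega)]
      rfl
    | cons v0 vs =>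
      dsimp only
      have hw : (v0 :: vs).map (fun v => v - v0) = 0 :: vs.map (fun v => v - v0) := by
        simp
      rw [hw, pv_fold_loopBody, PySem.List.length_pyRange_one,
        show (max c 0 - 0).toNat = (max c 0).toNat from by omega,
        (pv_inv (vs.map (fun v => v - v0)) (max c 0).toNat).1,
        pv_findSums_eq_iter, pv_iter_shift (v0 :: vs) v0 c.toNat]
      have hnat : (max c 0).toNat = c.toNat := by omega
      have hcast : ((c.toNat : Int)) = max c 0 := by omega
      rw [hw, hnat, hcast]

-- ===== VERDICT (by name: the statement is the Claim_ definition above) =====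
theorem get_reachable_sums_spec : Claim_equal_get_reachable_sums := by
  intro values n k _
  unfold Spec_get_reachable_sums get_reachable_sums get_reachable_sums_alt
  rw [List.foldl_cons, List.foldl_cons, List.foldl_nil, pv_step, pv_step]
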